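-- pv_equiv track=rewrite | github.com/roed314/padicprec | sage/precision/printing.py | repr_index
-- ===== SOURCE A (Python) =====
-- def repr_index(s,ind):
--     ls = s.split('\n')
--     lind = ind.split('\n')
--     length = max([ len(line) for line in ls ])
--     ns = len(ls)
--     nind = len(lind)
--     if nind > 1: op = " "
--     else: op = "_"
--     s = ""
--     for i in range(ns+nind-1):
--         if i < ns:
--             t = ls[i]
--             s += t
--             s += " " * (length - len(t))
--         else:
--             s += " " * length
--         if i >= ns-1:
--             s += op + lind[i-ns+1]
--         s += "\n"
--     return s[:-1]
-- ===== SOURCE B (Python) =====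
-- def repr_index(s, ind):
--     ls = s.split('\n')
--     lind = ind.split('\n')
--     length = max(map(len, ls))
--     op = "_" if len(lind) == 1 else " "
--     top = "\n".join(line + " " * (length - len(line)) for line in ls)
--     return top + op + ("\n" + " " * length + op).join(lind)
-- ===== Notes on version B (the rewrite author's own statement) =====
-- stated objective: simpler
-- what changed: Replaces A's per-row loop (with in-loop branch decisions deciding padding vs blank and whether to attach an index piece, then s[:-1]) by two loop-free joins: the padded text lines joined with a newline, and the index lines joined with the composite separator newline+spaces+op, concatenated; no row iteration or branching remains.
import Mathlib
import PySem

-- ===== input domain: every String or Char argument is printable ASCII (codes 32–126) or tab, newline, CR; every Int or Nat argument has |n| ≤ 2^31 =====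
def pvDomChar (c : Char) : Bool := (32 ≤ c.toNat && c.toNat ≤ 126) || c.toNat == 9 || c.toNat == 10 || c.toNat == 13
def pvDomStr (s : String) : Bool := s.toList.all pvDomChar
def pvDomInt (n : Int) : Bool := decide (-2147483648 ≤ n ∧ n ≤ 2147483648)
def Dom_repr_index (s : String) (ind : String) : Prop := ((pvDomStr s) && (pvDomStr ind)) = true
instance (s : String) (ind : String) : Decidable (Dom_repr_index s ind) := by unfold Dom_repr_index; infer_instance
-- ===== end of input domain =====

-- B replaces A's per-row decision loop by two loop-free joins: the padded text lines joined with '\n',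
-- concatenated with the index lines joined by the composite separator '\n'+spaces+op; objective: simpler (return value only; no mutation).


-- ===== PORT A =====
-- literal transliteration of A: one loop over the row indices, appending the padded text piece and
-- (from row ns-1 on) the op+index piece to a string accumulator, then s[:-1] via PySem slice.
-- ls[i] / lind[i-ns+1] are ported with pyGetD (the index is provably in range, so the default is
-- never taken); max(...) via PySem.List.max? (split never returns [], so the .getD default is never
-- taken); " "*k via pyRepeat (clamps at 0 exactly like Python).
def repr_index (s : String) (ind : String) : String :=
  let ls := PySem.Chars.splitOn s.toList ['\n']
  let lind := PySem.Chars.splitOn ind.toList ['\n']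
  let length : Nat := ((PySem.List.max? (ls.map fun line => line.length) (fun x => x)).getD 0)
  let ns : Nat := ls.length
  let nind : Nat := lind.length
  let op : List Char := if 1 < nind then [' '] else ['_']
  let out : List Char :=
    (PySem.List.pyRange 0 ((ns : Int) + (nind : Int) - 1) 1).foldl (fun acc i =>
      let acc := if i < (ns : Int) then
          let t := PySem.List.pyGetD ls i []
          acc ++ t ++ PySem.List.pyRepeat [' '] ((length : Int) - (t.length : Int))
        else acc ++ PySem.List.pyRepeat [' '] (length : Int)
      let acc := if (ns : Int) - 1 ≤ i then
          acc ++ op ++ PySem.List.pyGetD lind (i - (ns : Int) + 1) []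
        else acc
      acc ++ ['\n']) []
  String.ofList (PySem.List.slice out none (some (-1)))

-- ===== PORT B =====
-- Source B: top = "\n".join(line + " "*(length-len(line)) for line in ls); return top + op + ("\n" + " "*length + op).join(lind).
-- " "*(length-len(line)) is ported as List.replicate (length - line.length) ' ' (exact: Nat subtraction
-- clamps at 0 exactly as Python's * clamps a negative count); join via PySem.Chars.join.
def repr_index_alt (s : String) (ind : String) : String :=
  let ls := PySem.Chars.splitOn s.toList ['\n']
  let lind := PySem.Chars.splitOn ind.toList ['\n']
  let length : Nat := ((PySem.List.max? (ls.map fun line => line.length) (fun x => x)).getD 0)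
  let op : List Char := if lind.length == 1 then ['_'] else [' ']
  let top : List Char :=
    PySem.Chars.join ['\n'] (ls.map fun line => line ++ List.replicate (length - line.length) ' ')
  String.ofList (top ++ op ++ PySem.Chars.join (['\n'] ++ List.replicate length ' ' ++ op) lind)

-- ===== PRECONDITION & SPEC =====
def Spec_repr_index (s : String) (ind : String) (out : String) : Prop := out = repr_index_alt s ind
instance (s : String) (ind : String) (out : String) : Decidable (Spec_repr_index s ind out) := by unfold Spec_repr_index; infer_instance

-- ===== CLAIM (what is proved, stated in full; the proofs are below) =====
def Claim_equal_repr_index : Prop := ∀ (s : String) (ind : String), Dom_repr_index s ind → Spec_repr_index s ind (repr_index s ind)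

-- ===== LEMMAS AND PROOFS =====

-- str.split always returns at least one piece
lemma splitOn_go_ne_nil (sep : List Char) :
    ∀ (fuel : Nat) (l cur : List Char) (acc : List (List Char)),
      PySem.Chars.splitOn.go sep fuel l cur acc ≠ [] := by
  intro fuel
  induction fuel with
  | zero => intro l cur acc; simp [PySem.Chars.splitOn.go]
  | succ n ih =>
    intro l cur acc
    cases l with
    | nil => simp [PySem.Chars.splitOn.go]
    | cons c rest =>
      rw [PySem.Chars.splitOn.go]
      split
      · exact ih _ _ _
      · exact ih _ _ _

lemma splitOn_ne_nil (s sep : List Char) : PySem.Chars.splitOn s sep ≠ [] := by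
  unfold PySem.Chars.splitOn; exact splitOn_go_ne_nil _ _ _ _ _

lemma join_nl_concat (r : List Char) (rest : List (List Char)) :
    PySem.Chars.join ['\n'] (r :: rest) ++ ['\n']
      = ((r :: rest).map (fun x => x ++ ['\n'])).flatten := by
  induction rest generalizing r with
  | nil => simp [PySem.Chars.join_singleton]
  | cons q rest ih =>
    rw [PySem.Chars.join_cons_cons]
    simp only [List.map_cons, List.flatten_cons] at *
    rw [← ih q]
    simp

-- A's fold, minus the trailing newline, is the '\n'-join of the explicit row list
lemma cols_eq (ls lind : List (List Char)) (hls : ls ≠ []) (hlind : lind ≠ [])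
    (length : Nat) :
    PySem.List.slice
      ((PySem.List.pyRange 0 ((ls.length : Int) + (lind.length : Int) - 1) 1).foldl (fun acc i =>
        let acc := if i < (ls.length : Int) then
            let t := PySem.List.pyGetD ls i []
            acc ++ t ++ PySem.List.pyRepeat [' '] ((length : Int) - (t.length : Int))
          else acc ++ PySem.List.pyRepeat [' '] (length : Int)
        let acc := if (ls.length : Int) - 1 ≤ i then
            acc ++ (if 1 < lind.length then [' '] else ['_']) ++ PySem.List.pyGetD lind (i - (ls.length : Int) + 1) []
          else acc
        acc ++ ['\n']) []) none (some (-1))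
    = PySem.Chars.join ['\n'] (List.zipWith (· ++ ·)
        ((ls.map fun line => line ++ List.replicate (length - line.length) ' ')
          ++ List.replicate (lind.length - 1) (List.replicate length ' '))
        (List.replicate (ls.length - 1) [] ++ lind.map (fun x =>
          (if lind.length == 1 then ['_'] else [' ']) ++ x))) := by
  have hns : 1 ≤ ls.length := List.length_pos_iff.mpr hls
  have hnind : 1 ≤ lind.length := List.length_pos_iff.mpr hlind
  set n : Nat := ls.length + lind.length - 1 with hn
  have hop : (if 1 < lind.length then ([' '] : List Char) else ['_'])
      = (if lind.length == 1 then ['_'] else [' ']) := by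
    by_cases h : lind.length = 1
    · simp [h]
    · have h1 : 1 < lind.length := by omega
      simp [h1, h]
  -- the per-row string
  set g : Nat → List Char := fun k =>
    (if (k : Int) < (ls.length : Int) then
        PySem.List.pyGetD ls (k : Int) []
          ++ PySem.List.pyRepeat [' '] ((length : Int) - ((PySem.List.pyGetD ls (k : Int) []).length : Int))
      else PySem.List.pyRepeat [' '] (length : Int))
    ++ ((if (ls.length : Int) - 1 ≤ (k : Int) then
          (if 1 < lind.length then ([' '] : List Char) else ['_']) ++ PySem.List.pyGetD lind ((k : Int) - (ls.length : Int) + 1) [] else [])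
        ++ ['\n']) with hg
  set rows : List (List Char) := List.zipWith (· ++ ·)
      ((ls.map fun line => line ++ List.replicate (length - line.length) ' ')
        ++ List.replicate (lind.length - 1) (List.replicate length ' '))
      (List.replicate (ls.length - 1) [] ++ lind.map (fun x => (if lind.length == 1 then (['_'] : List Char) else [' ']) ++ x)) with hrows
  have hrowslen : rows.length = n := by
    simp [hrows]
    omega
  have hcast : (ls.length : Int) + (lind.length : Int) - 1 = ((n : Nat) : Int) := by omega
  rw [hcast, PySem.List.pyRange_zero_natCast, List.foldl_map]
  have hbody : List.foldl (fun (acc : List Char) (k : Nat) =>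
        (fun acc (i : Int) =>
          let acc := if i < (ls.length : Int) then
              let t := PySem.List.pyGetD ls i []
              acc ++ t ++ PySem.List.pyRepeat [' '] ((length : Int) - (t.length : Int))
            else acc ++ PySem.List.pyRepeat [' '] (length : Int)
          let acc := if (ls.length : Int) - 1 ≤ i then
              acc ++ (if 1 < lind.length then ([' '] : List Char) else ['_']) ++ PySem.List.pyGetD lind (i - (ls.length : Int) + 1) []
            else acc
          acc ++ ['\n']) acc (k : Int)) [] (List.range n)
      = List.foldl (fun acc k => acc ++ g k) [] (List.range n) := by
    apply PySem.List.foldl_congr_mem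
    intro acc k _
    simp only [hg]
    split_ifs <;> simp [List.append_assoc]
  rw [hbody, PySem.List.foldl_append_eq_flatMap, List.nil_append, List.flatMap_def]
  have hmap : (List.range n).map g = rows.map (fun x => x ++ ['\n']) := by
    apply List.ext_getElem
    · simp [hrowslen]
    · intro k h1 h2
      simp only [List.getElem_map, List.getElem_range]
      have hk : k < n := by simpa using h1
      have hkrows : k < rows.length := by omega
      simp only [hrows] at hkrows ⊢
      rw [List.getElem_zipWith]
      by_cases hk1 : k < ls.length
      · have hlk : k < (ls.map fun line => line ++ List.replicate (length - line.length) ' ').length := by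
          simpa using hk1
        rw [List.getElem_append_left hlk, List.getElem_map]
        by_cases hk2 : k < ls.length - 1
        · -- text row with no index
          have hrk : k < (List.replicate (ls.length - 1) ([] : List Char)).length := by simpa using hk2
          rw [List.getElem_append_left hrk, List.getElem_replicate]
          rw [hg]
          have c1 : (k : Int) < (ls.length : Int) := by omega
          have c2 : ¬ ((ls.length : Int) - 1 ≤ (k : Int)) := by omega
          simp only [c1, c2, if_false, if_pos, List.nil_append,
            PySem.List.pyGetD_natCast, PySem.List.pyRepeat_singleton, Int.toNat_sub]
          rw [List.getD_eq_getElem ls [] (by omega : k < ls.length)]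
          simp
        · -- the row carrying lind[0] (k = ns-1)
          have hge : (List.replicate (ls.length - 1) ([] : List Char)).length ≤ k := by
            simp; omega
          rw [List.getElem_append_right hge]
          simp only [List.getElem_map, List.length_replicate]
          rw [hg]
          have c1 : (k : Int) < (ls.length : Int) := by omega
          have c2 : (ls.length : Int) - 1 ≤ (k : Int) := by omega
          have hidx : (k : Int) - (ls.length : Int) + 1 = ((k + 1 - ls.length : Nat) : Int) := by omega
          simp only [c1, c2, if_pos, hidx,
            PySem.List.pyGetD_natCast, PySem.List.pyRepeat_singleton, Int.toNat_sub, hop]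
          rw [List.getD_eq_getElem ls [] (by omega : k < ls.length),
            List.getD_eq_getElem lind [] (by omega : k + 1 - ls.length < lind.length)]
          have h2 : k + 1 - ls.length = k - (ls.length - 1) := by omega
          simp [h2, List.append_assoc]
      · -- pure index row
        have hge : (ls.map fun line => line ++ List.replicate (length - line.length) ' ').length ≤ k := by
          simp; omega
        rw [List.getElem_append_right hge, List.getElem_replicate]
        have hge2 : (List.replicate (ls.length - 1) ([] : List Char)).length ≤ k := by simp; omega
        rw [List.getElem_append_right hge2]
        simp only [List.getElem_map, List.length_replicate]
        rw [hg]
        have c1 : ¬ ((k : Int) < (ls.length : Int)) := by omega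
        have c2 : (ls.length : Int) - 1 ≤ (k : Int) := by omega
        have hidx : (k : Int) - (ls.length : Int) + 1 = ((k + 1 - ls.length : Nat) : Int) := by omega
        simp only [c1, c2, if_pos, hidx,
          PySem.List.pyGetD_natCast, PySem.List.pyRepeat_singleton, Int.toNat_sub, hop]
        rw [List.getD_eq_getElem lind [] (by omega : k + 1 - ls.length < lind.length)]
        have h1 : ((length : Int)).toNat = length := rfl
        have h2 : k + 1 - ls.length = k - (ls.length - 1) := by omega
        simp [h1, h2, List.append_assoc]
  rw [hmap]
  have hn1 : 1 ≤ n := by omega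
  obtain ⟨r, rest, hr⟩ : ∃ r rest, rows = r :: rest := by
    cases hrw : rows with
    | nil => rw [hrw] at hrowslen; simp at hrowslen; omega
    | cons a b => exact ⟨a, b, rfl⟩
  rw [hr, ← join_nl_concat, PySem.List.slice_to_neg_one, List.dropLast_concat]

-- the blank index-only rows of the zip form, as a single map
lemma zip_blank (blank op : List Char) (lr : List (List Char)) :
    List.zipWith (· ++ ·) (List.replicate lr.length blank) (lr.map (fun x => op ++ x))
      = lr.map (fun x => blank ++ op ++ x) := by
  induction lr with
  | nil => simp
  | cons x lr ih => simp [List.replicate_succ, ih, List.append_assoc]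

-- the zip form of the row list, decomposed at the row carrying lind[0]
lemma rows_decomp (blank op l0 p : List Char) (lr : List (List Char)) :
    ∀ (P₁ : List (List Char)),
      List.zipWith (· ++ ·) ((P₁ ++ [p]) ++ List.replicate lr.length blank)
        (List.replicate P₁.length [] ++ (l0 :: lr).map (fun x => op ++ x))
      = P₁ ++ (p ++ op ++ l0) :: lr.map (fun x => blank ++ op ++ x) := by
  intro P₁
  induction P₁ with
  | nil => simp [zip_blank, List.append_assoc]
  | cons q qs ih => simpa [List.replicate_succ, List.append_assoc] using ih

-- join as a flatten (normal form for the remaining rearrangements)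
lemma join_eq_flatten (sep x : List Char) (l : List (List Char)) :
    PySem.Chars.join sep (x :: l) = x ++ (l.map (fun y => sep ++ y)).flatten := by
  induction l generalizing x with
  | nil => simp [PySem.Chars.join_singleton]
  | cons y l ih => rw [PySem.Chars.join_cons_cons, ih]; simp [List.append_assoc]

-- joining the decomposed rows equals B's two joins glued with op
lemma join_decomp (blank op p l0 : List Char) (P₁ lr : List (List Char)) :
    PySem.Chars.join ['\n'] (P₁ ++ (p ++ op ++ l0) :: lr.map (fun x => blank ++ op ++ x))
      = PySem.Chars.join ['\n'] (P₁ ++ [p]) ++ op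
          ++ PySem.Chars.join (['\n'] ++ blank ++ op) (l0 :: lr) := by
  cases P₁ with
  | nil =>
    simp only [List.nil_append, join_eq_flatten, List.map_map]
    simp [Function.comp_def, List.append_assoc]
  | cons q qs =>
    simp only [List.cons_append, join_eq_flatten, List.map_append, List.map_cons,
      List.flatten_append, List.flatten_cons, List.map_map]
    simp [Function.comp_def, List.append_assoc]

-- the whole B-side: A's row list joined equals B's expression
lemma bcols (ls lind : List (List Char)) (hls : ls ≠ []) (hlind : lind ≠ [])
    (length : Nat) :
    PySem.Chars.join ['\n'] (List.zipWith (· ++ ·)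
        ((ls.map fun line => line ++ List.replicate (length - line.length) ' ')
          ++ List.replicate (lind.length - 1) (List.replicate length ' '))
        (List.replicate (ls.length - 1) [] ++ lind.map (fun x =>
          (if lind.length == 1 then ['_'] else [' ']) ++ x)))
    = PySem.Chars.join ['\n'] (ls.map fun line => line ++ List.replicate (length - line.length) ' ')
        ++ (if lind.length == 1 then ['_'] else [' '])
        ++ PySem.Chars.join (['\n'] ++ List.replicate length ' '
            ++ (if lind.length == 1 then ['_'] else [' '])) lind := by
  obtain ⟨l0, lr, rfl⟩ : ∃ l0 lr, lind = l0 :: lr := by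
    cases lind with
    | nil => exact absurd rfl hlind
    | cons a b => exact ⟨a, b, rfl⟩
  obtain ⟨P₁, p, hP⟩ : ∃ P₁ p,
      (ls.map fun line => line ++ List.replicate (length - line.length) ' ') = P₁ ++ [p] := by
    rcases (ls.map fun line => line ++ List.replicate (length - line.length) ' ').eq_nil_or_concat
      with h | ⟨P₁, p, h⟩
    · exact absurd (List.map_eq_nil_iff.mp h) hls
    · exact ⟨P₁, p, by rw [h, List.concat_eq_append]⟩
  have hlen1 : (l0 :: lr).length - 1 = lr.length := by simp
  have hlen2 : ls.length - 1 = P₁.length := by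
    have : ls.length = P₁.length + 1 := by
      have := congrArg List.length hP; simpa using this
    omega
  rw [hP, hlen1, hlen2, rows_decomp, join_decomp]

-- ===== VERDICT (by name: the statement is the Claim_ definition above) =====
theorem repr_index_spec : Claim_equal_repr_index := by
  intro s ind _
  unfold Spec_repr_index
  simp only [repr_index, repr_index_alt]
  exact congrArg String.ofList
    ((cols_eq _ _ (splitOn_ne_nil _ _) (splitOn_ne_nil _ _) _).trans
      (bcols _ _ (splitOn_ne_nil _ _) (splitOn_ne_nil _ _) _))
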